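-- pv_equiv track=rewrite | github.com/bkubwimana/tegra_monitor | eval/utils/model_config.py | suggest_alternative_configs
-- ===== SOURCE A (Python) =====
-- def suggest_alternative_configs(num_heads: int, max_gpus: int) -> list:
--     """Suggest alternative tensor parallel configurations"""
--     suggestions = []
--
--     for tp_size in range(1, max_gpus + 1):
--         if num_heads % tp_size == 0:
--             suggestions.append({
--                 'tensor_parallel_size': tp_size,
--                 'heads_per_gpu': num_heads // tp_size,
--                 'gpus_used': tp_size
--             })
--
--     return suggestions
-- ===== SOURCE B (Python) =====
-- def suggest_alternative_configs(num_heads: int, max_gpus: int) -> list: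
--     """Suggest alternative tensor parallel configurations (divisor enumeration up to sqrt)"""
--     divs = set()
--     d = 1
--     while d * d <= num_heads:
--         if num_heads % d == 0:
--             if d <= max_gpus:
--                 divs.add(d)
--             if num_heads // d <= max_gpus:
--                 divs.add(num_heads // d)
--         d += 1
--     return [{'tensor_parallel_size': tp,
--              'heads_per_gpu': num_heads // tp,
--              'gpus_used': tp}
--             for tp in sorted(divs)]
-- ===== Notes on version B (the rewrite author's own statement) =====
-- stated objective: faster
-- what changed: Instead of testing every tp_size in 1..max_gpus with a modulus, B enumerates divisor pairs (d, num_heads//d) up to sqrt(num_heads), filters them by max_gpus and sorts ascending; Pre_ restricts to positive num_heads, the natural domain of a head count (on zero or negative head counts A's full-range / sign-flipped output is an accident of the modulus test).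
-- outside the precondition, e.g. on suggest_alternative_configs(0, 1): A returns [{'tensor_parallel_size': 1, 'heads_per_gpu': 0, 'gpus_used': 1}], B returns []
import Mathlib
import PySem

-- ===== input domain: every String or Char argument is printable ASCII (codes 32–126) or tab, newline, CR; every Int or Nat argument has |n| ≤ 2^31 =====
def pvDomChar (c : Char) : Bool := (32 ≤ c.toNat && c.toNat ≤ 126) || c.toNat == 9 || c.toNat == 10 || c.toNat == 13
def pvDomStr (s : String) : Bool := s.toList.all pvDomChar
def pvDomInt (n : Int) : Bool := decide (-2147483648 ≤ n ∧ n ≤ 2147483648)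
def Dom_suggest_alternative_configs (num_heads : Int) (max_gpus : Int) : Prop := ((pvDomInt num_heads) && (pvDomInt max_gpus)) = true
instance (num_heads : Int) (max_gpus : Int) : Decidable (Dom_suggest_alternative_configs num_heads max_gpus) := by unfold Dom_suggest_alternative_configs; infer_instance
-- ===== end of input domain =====

-- B replaces A's linear scan over 1..max_gpus by enumerating divisor pairs of num_heads up to its
-- square root, filtering by max_gpus and sorting ascending (objective: faster, asymptotically),
-- on positive head counts (Pre_).

-- ===== PORT A =====
-- for tp_size in range(1, max_gpus+1): if num_heads % tp_size == 0: suggestions.append({...})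
def suggest_alternative_configs (num_heads : Int) (max_gpus : Int) : List (List (String × Int)) :=
  (PySem.List.pyRange 1 (max_gpus + 1) 1).foldl
    (fun suggestions tp_size =>
      if PySem.Int.mod num_heads tp_size = 0 then
        suggestions ++ [[("tensor_parallel_size", tp_size),
                         ("heads_per_gpu", PySem.Int.floordiv num_heads tp_size),
                         ("gpus_used", tp_size)]]
      else suggestions)
    []

-- ===== PORT B =====
-- the dict literal built in B's final comprehension
def pvEntry (num_heads : Int) (tp : Int) : List (String × Int) :=
  [("tensor_parallel_size", tp),
   ("heads_per_gpu", PySem.Int.floordiv num_heads tp),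
   ("gpus_used", tp)]

-- B's while loop: d counts up while d*d <= n, collecting divisors d and n//d that are <= max_gpus.
-- The Nat argument is fuel making the recursion structural; the caller passes enough for the whole loop.
def pvDivLoop (n : Int) (max_gpus : Int) : Nat → Int → PySem.Set Int → PySem.Set Int
  | 0, _d, s => s
  | fuel + 1, d, s =>
    if d * d ≤ n then
      pvDivLoop n max_gpus fuel (d + 1)
        (if PySem.Int.mod n d = 0 then
          (let s1 := if d ≤ max_gpus then PySem.Set.add s d else s
           if PySem.Int.floordiv n d ≤ max_gpus then
             PySem.Set.add s1 (PySem.Int.floordiv n d) else s1)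
         else s)
    else s

def suggest_alternative_configs_alt (num_heads : Int) (max_gpus : Int) : List (List (String × Int)) :=
  (PySem.List.sorted
      (pvDivLoop num_heads max_gpus (num_heads.toNat + 1) 1 PySem.Set.empty)
      (fun x => x) false).map (pvEntry num_heads)

-- ===== PRECONDITION & SPEC =====
-- Pre_ restricts to the natural domain of a head count: num_heads ≥ 1. A still returns on zero or
-- negative num_heads (all sizes resp. divisors of |num_heads|), an accident of the modulus test
-- outside the function's purpose.
def Pre_suggest_alternative_configs (num_heads : Int) (_max_gpus : Int) : Prop := 1 ≤ num_heads
instance (num_heads : Int) (max_gpus : Int) : Decidable (Pre_suggest_alternative_configs num_heads max_gpus) := by unfold Pre_suggest_alternative_configs; infer_instance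

def pvWitness_suggest_alternative_configs : Int × Int := (12, 4)

def Spec_suggest_alternative_configs (num_heads : Int) (max_gpus : Int) (out : List (List (String × Int))) : Prop := out = suggest_alternative_configs_alt num_heads max_gpus
instance (num_heads : Int) (max_gpus : Int) (out : List (List (String × Int))) : Decidable (Spec_suggest_alternative_configs num_heads max_gpus out) := by unfold Spec_suggest_alternative_configs; infer_instance

-- ===== CLAIM (what is proved, stated in full; the proofs are below) =====
def Claim_equal_suggest_alternative_configs : Prop := ∀ (num_heads : Int) (max_gpus : Int), Dom_suggest_alternative_configs num_heads max_gpus → Pre_suggest_alternative_configs num_heads max_gpus → Spec_suggest_alternative_configs num_heads max_gpus (suggest_alternative_configs num_heads max_gpus)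

-- ===== LEMMAS AND PROOFS =====

-- the collecting loop keeps the set duplicate-free
theorem pvDivLoop_nodup (n max_gpus : Int) :
    ∀ (fuel : Nat) (d : Int) (s : PySem.Set Int), s.Nodup → (pvDivLoop n max_gpus fuel d s).Nodup := by
  intro fuel
  induction fuel with
  | zero => intro d s hs; exact hs
  | succ f ih =>
    intro d s hs
    unfold pvDivLoop
    split
    · apply ih
      split
      · split <;> split <;>
          first
            | exact PySem.Set.nodup_add _ _ (PySem.Set.nodup_add _ _ hs)
            | exact PySem.Set.nodup_add _ _ hs
            | exact hs
      · exact hs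
    · exact hs

-- membership in the loop's result, given fuel covering the remaining iterations
theorem pvDivLoop_mem (n max_gpus : Int) :
    ∀ (fuel : Nat) (d : Int) (s : PySem.Set Int), 1 ≤ d → n + 1 - d ≤ fuel → ∀ x : Int,
    (x ∈ pvDivLoop n max_gpus fuel d s ↔
      x ∈ s ∨ (x ∣ n ∧ x ≤ max_gpus ∧
        ((d ≤ x ∧ x * x ≤ n) ∨ (d ≤ n / x ∧ (n / x) * (n / x) ≤ n ∧ 1 ≤ x)))) := by
  intro fuel
  induction fuel with
  | zero =>
    intro d s hd hfuel x
    have hnd : n + 1 ≤ d := by omega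
    constructor
    · exact Or.inl
    · rintro (hx | ⟨hdvd, _, ⟨hdx, hxx⟩ | ⟨hdq, hqq, _⟩⟩)
      · exact hx
      · have hp : 0 ≤ (x - 1) * x := mul_nonneg (by linarith) (by linarith)
        have he : (x - 1) * x = x * x - x := by ring
        linarith
      · have hp : 0 ≤ (n / x - 1) * (n / x) := mul_nonneg (by linarith) (by linarith)
        have he : (n / x - 1) * (n / x) = n / x * (n / x) - n / x := by ring
        linarith
  | succ f ih =>
    intro d s hd hfuel x
    unfold pvDivLoop
    by_cases h : d * d ≤ n
    · rw [if_pos h]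
      have hdpos : (0:ℤ) < d := hd
      have hdn' : d ≤ n := by
        have hp : 0 ≤ (d - 1) * d := mul_nonneg (by linarith) (by linarith)
        have he : (d - 1) * d = d * d - d := by ring
        linarith
      -- membership in the set after this iteration's adds
      have key : ∀ y : ℤ,
          (y ∈ (if PySem.Int.mod n d = 0 then
                  (let s1 := if d ≤ max_gpus then PySem.Set.add s d else s
                   if PySem.Int.floordiv n d ≤ max_gpus then
                     PySem.Set.add s1 (PySem.Int.floordiv n d) else s1)
                else s)) ↔
          (y ∈ s ∨ (d ∣ n ∧ ((y = d ∧ d ≤ max_gpus) ∨ (y = n / d ∧ n / d ≤ max_gpus)))) := by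
        intro y
        rw [PySem.Int.floordiv_eq_ediv_of_pos hdpos]
        by_cases hdn : PySem.Int.mod n d = 0
        · rw [if_pos hdn]
          rw [PySem.Int.mod_eq_zero_iff_dvd] at hdn
          by_cases h1 : d ≤ max_gpus <;> by_cases h2 : n / d ≤ max_gpus <;>
            simp only [h1, h2, if_pos, if_neg, not_false_iff,
              PySem.Set.mem_add, hdn, true_and] <;> tauto
        · rw [if_neg hdn]
          rw [PySem.Int.mod_eq_zero_iff_dvd] at hdn
          simp [hdn]
      refine (ih _ _ (by omega) (by omega) x).trans ?_
      constructor
      · rintro (hmem | ⟨hdvd, hle, hC⟩)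
        · rcases (key x).mp hmem with hx | ⟨hdn, ⟨rfl, hmg⟩ | ⟨rfl, hmg⟩⟩
          · exact Or.inl hx
          · exact Or.inr ⟨hdn, hmg, Or.inl ⟨le_refl _, h⟩⟩
          · -- x = n / d, the large cofactor
            have hmul : d * (n / d) = n := Int.mul_ediv_cancel' hdn
            have hq1 : 1 ≤ n / d := (Int.le_ediv_iff_mul_le hdpos).mpr (by linarith)
            have hqne : n / d ≠ 0 := by omega
            have hback : n / (n / d) = d := by
              have h2 : (n / d) * d = n := by linarith [mul_comm d (n / d)]
              calc n / (n / d) = ((n / d) * d) / (n / d) := by rw [h2]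
                _ = d := Int.mul_ediv_cancel_left _ hqne
            refine Or.inr ⟨⟨d, by linarith [mul_comm d (n / d)]⟩, hmg, Or.inr ?_⟩
            rw [hback]
            exact ⟨le_refl _, h, hq1⟩
        · refine Or.inr ⟨hdvd, hle, ?_⟩
          rcases hC with ⟨h1, h2⟩ | ⟨h1, h2, h3⟩
          · exact Or.inl ⟨by omega, h2⟩
          · exact Or.inr ⟨by omega, h2, h3⟩
      · rintro (hx | ⟨hdvd, hle, hC⟩)
        · exact Or.inl ((key x).mpr (Or.inl hx))
        · rcases hC with ⟨hdx, hxx⟩ | ⟨hdq, hqq, hx1⟩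
          · rcases eq_or_lt_of_le hdx with heq | hlt
            · exact Or.inl ((key x).mpr (Or.inr ⟨heq ▸ hdvd, Or.inl ⟨heq.symm, heq ▸ hle⟩⟩))
            · exact Or.inr ⟨hdvd, hle, Or.inl ⟨by omega, hxx⟩⟩
          · rcases eq_or_lt_of_le hdq with heq | hlt
            · -- n / x = d : x = n / d gets added now
              have hxne : x ≠ 0 := by omega
              have hmul : x * (n / x) = n := Int.mul_ediv_cancel' hdvd
              have hnxd : n = d * x := by rw [← heq] at hmul; linarith [mul_comm x d]
              have hxnd : x = n / d := by
                rw [hnxd, Int.mul_ediv_cancel_left _ (by omega : d ≠ 0)]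
              exact Or.inl ((key x).mpr (Or.inr ⟨⟨x, hnxd⟩, Or.inr ⟨hxnd, hxnd ▸ hle⟩⟩))
            · exact Or.inr ⟨hdvd, hle, Or.inr ⟨by omega, hqq, hx1⟩⟩
    · rw [if_neg h]
      constructor
      · exact Or.inl
      · rintro (hx | ⟨hdvd, _, ⟨hdx, hxx⟩ | ⟨hdq, hqq, _⟩⟩)
        · exact hx
        · have hp : 0 ≤ (x - d) * (x + d) := mul_nonneg (by linarith) (by linarith)
          have he : (x - d) * (x + d) = x * x - d * d := by ring
          linarith
        · have hp : 0 ≤ (n / x - d) * (n / x + d) := mul_nonneg (by linarith) (by linarith)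
          have he : (n / x - d) * (n / x + d) = n / x * (n / x) - d * d := by ring
          linarith

-- membership at the top-level call: exactly the divisors of n in [1, max_gpus]
theorem pvDivLoop_mem_top (n max_gpus : Int) (hn : 1 ≤ n) (x : Int) :
    x ∈ pvDivLoop n max_gpus (n.toNat + 1) 1 PySem.Set.empty ↔
      (1 ≤ x ∧ x ≤ max_gpus) ∧ x ∣ n := by
  rw [pvDivLoop_mem n max_gpus (n.toNat + 1) 1 PySem.Set.empty le_rfl (by omega) x]
  constructor
  · rintro (hx | ⟨hdvd, hle, ⟨h1, _⟩ | ⟨_, _, h1⟩⟩)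
    · cases hx
    · exact ⟨⟨h1, hle⟩, hdvd⟩
    · exact ⟨⟨h1, hle⟩, hdvd⟩
  · rintro ⟨⟨hx1, hle⟩, hdvd⟩
    refine Or.inr ⟨hdvd, hle, ?_⟩
    by_cases hxx : x * x ≤ n
    · exact Or.inl ⟨hx1, hxx⟩
    · have hxpos : (0:ℤ) < x := hx1
      have hmul : x * (n / x) = n := Int.mul_ediv_cancel' hdvd
      have hxn : x ≤ n := Int.le_of_dvd (by omega) hdvd
      have hq1 : 1 ≤ n / x := (Int.le_ediv_iff_mul_le hxpos).mpr (by linarith)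
      refine Or.inr ⟨hq1, ?_, hx1⟩
      by_contra hq2
      have hx2 : n + 1 ≤ x * x := Int.lt_iff_add_one_le.mp (lt_of_not_ge hxx)
      have hq3 : n + 1 ≤ n / x * (n / x) := Int.lt_iff_add_one_le.mp (lt_of_not_ge hq2)
      have hbig : (n + 1) * (n + 1) ≤ (x * x) * (n / x * (n / x)) :=
        mul_le_mul hx2 hq3 (by linarith) (by linarith)
      have hsq : (x * x) * (n / x * (n / x)) = n * n := by
        calc (x * x) * (n / x * (n / x)) = (x * (n / x)) * (x * (n / x)) := by ring
          _ = n * n := by rw [hmul]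
      have he : (n + 1) * (n + 1) = n * n + 2 * n + 1 := by ring
      linarith

-- A's loop keeps exactly the tp_sizes of the range that divide num_heads, in order
theorem pvA_filter (num_heads max_gpus : Int) :
    suggest_alternative_configs num_heads max_gpus =
      ((PySem.List.pyRange 1 (max_gpus + 1) 1).filter
          (fun tp => decide (PySem.Int.mod num_heads tp = 0))).map (pvEntry num_heads) := by
  unfold suggest_alternative_configs
  exact (PySem.List.foldl_append_ite (fun tp => PySem.Int.mod num_heads tp = 0)
    (pvEntry num_heads) (PySem.List.pyRange 1 (max_gpus + 1) 1) []).trans (List.nil_append _)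

-- ===== VERDICT (by name: the statement is the Claim_ definition above) =====
theorem suggest_alternative_configs_spec : Claim_equal_suggest_alternative_configs := by
  intro num_heads max_gpus _ hn
  show _ = _
  rw [pvA_filter]
  unfold suggest_alternative_configs_alt
  congr 1
  symm
  apply PySem.List.sorted_eq_of_perm_of_pairwise_lt
  · -- the filtered range is a permutation of the collected divisor set
    apply (List.perm_ext_iff_of_nodup _ (pvDivLoop_nodup _ _ _ _ _ List.nodup_nil)).mpr
    · intro x
      refine Iff.trans ?_ (pvDivLoop_mem_top num_heads max_gpus hn x).symm
      rw [List.mem_filter, PySem.List.mem_pyRange_one]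
      simp only [decide_eq_true_eq, PySem.Int.mod_eq_zero_iff_dvd]
      constructor
      · rintro ⟨⟨a, b⟩, c⟩; exact ⟨⟨a, by omega⟩, c⟩
      · rintro ⟨⟨a, b⟩, c⟩; exact ⟨⟨a, by omega⟩, c⟩
    · exact (PySem.List.nodup_pyRange_one 1 (max_gpus + 1)).filter _
  · exact (PySem.List.pairwise_lt_pyRange_one 1 (max_gpus + 1)).filter _
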